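-- pv_equiv track=rewrite | github.com/tobiasspt/advent_of_code | 2015/Day03/day03.py | deliver_presents
-- ===== SOURCE A (Python) =====
-- def deliver_presents(instructions: str) -> list[list[int,int]]:
--
--     x = 0
--     y = 0
--
--     list_of_houses = [(x,y)]
--     for d in instructions:
--
--         if d == '^':
--             y+= 1
--         elif d == 'v':
--             y-= 1
--         elif d == '<':
--             x-= 1
--         elif d == '>':
--             x += 1
--
--         list_of_houses.append((x,y))
--
--     return list_of_houses
-- ===== SOURCE B (Python) =====
-- def deliver_presents(instructions: str) -> list:
--     # Back-to-front: build the suffix sums of the move deltas while walking the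
--     # string in reverse, then each visited position is (total - suffix_sum),
--     # emitted by reversing the suffix-sum list.
--     D = {'>': (1, 0), '<': (-1, 0), '^': (0, 1), 'v': (0, -1)}
--     suff = [(0, 0)]
--     for d in reversed(instructions):
--         dx, dy = D.get(d, (0, 0))
--         sx, sy = suff[-1]
--         suff.append((sx + dx, sy + dy))
--     tx, ty = suff[-1]
--     return [(tx - sx, ty - sy) for sx, sy in reversed(suff)]
-- ===== Notes on version B (the rewrite author's own statement) =====
-- stated objective: alternative
-- what changed: Instead of A's forward walk appending the running position, B traverses the string in REVERSE building the list of suffix delta sums, then derives every visited position as total-minus-suffix-sum while reversing that list, so the output is constructed back-to-front from a different invariant.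
import Mathlib
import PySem

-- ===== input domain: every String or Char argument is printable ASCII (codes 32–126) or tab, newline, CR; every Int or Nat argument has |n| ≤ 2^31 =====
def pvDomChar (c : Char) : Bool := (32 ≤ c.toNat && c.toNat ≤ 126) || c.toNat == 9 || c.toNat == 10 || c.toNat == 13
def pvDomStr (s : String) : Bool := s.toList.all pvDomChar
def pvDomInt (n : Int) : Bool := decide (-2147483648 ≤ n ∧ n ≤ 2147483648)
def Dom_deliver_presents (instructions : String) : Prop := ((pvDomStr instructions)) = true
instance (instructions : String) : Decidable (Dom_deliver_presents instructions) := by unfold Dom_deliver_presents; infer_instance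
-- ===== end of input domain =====

-- B walks the string in REVERSE building suffix sums of the deltas, then emits
-- every position as total-minus-suffix-sum while reversing that list (A walks
-- forward appending the running position).

-- ===== PORT A =====
-- A's loop state: (x, y, list_of_houses); branches in A's order, append each step.
def pvStepA (st : Int × Int × List (Int × Int)) (d : Char) : Int × Int × List (Int × Int) :=
  let x := st.1
  let y := st.2.1
  let acc := st.2.2
  let xy : Int × Int :=
    if d = '^' then (x, y + 1)
    else if d = 'v' then (x, y - 1)
    else if d = '<' then (x - 1, y)
    else if d = '>' then (x + 1, y)
    else (x, y)
  (xy.1, xy.2, acc ++ [xy])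

def deliver_presents (instructions : String) : List (Int × Int) :=
  (instructions.toList.foldl pvStepA (0, 0, [((0 : Int), (0 : Int))])).2.2

-- ===== PORT B =====
-- D.get(d, (0, 0)) for the 4-entry literal dict D (exact: lookup by key, default (0,0))
def pvDelta (d : Char) : Int × Int :=
  if d = '>' then (1, 0)
  else if d = '<' then (-1, 0)
  else if d = '^' then (0, 1)
  else if d = 'v' then (0, -1)
  else (0, 0)

-- one iteration of B's reversed loop: append suff[-1] + delta  (suff is nonempty throughout)
def pvStepB (suff : List (Int × Int)) (d : Char) : List (Int × Int) :=
  let dd := pvDelta d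
  let s := suff.getLastD (0, 0)
  suff ++ [(s.1 + dd.1, s.2 + dd.2)]

def deliver_presents_alt (instructions : String) : List (Int × Int) :=
  let suff := instructions.toList.reverse.foldl pvStepB [((0 : Int), (0 : Int))]
  let t := suff.getLastD (0, 0)   -- suff[-1]; suff is nonempty by construction
  suff.reverse.map (fun p => (t.1 - p.1, t.2 - p.2))

-- ===== PRECONDITION & SPEC =====
def Spec_deliver_presents (instructions : String) (out : List (Int × Int)) : Prop := out = deliver_presents_alt instructions
instance (instructions : String) (out : List (Int × Int)) : Decidable (Spec_deliver_presents instructions out) := by unfold Spec_deliver_presents; infer_instance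

-- ===== CLAIM =====
def Claim_equal_deliver_presents : Prop := ∀ (instructions : String), Dom_deliver_presents instructions → Spec_deliver_presents instructions (deliver_presents instructions)

-- ===== LEMMAS AND PROOFS =====

-- reference walk: the list of visited positions starting at p
def pvWalk : List Char → (Int × Int) → List (Int × Int)
  | [], p => [p]
  | d :: l, p => p :: pvWalk l (p.1 + (pvDelta d).1, p.2 + (pvDelta d).2)

-- sum of deltas
def pvSD : List Char → (Int × Int)
  | [] => (0, 0)
  | d :: l => ((pvDelta d).1 + (pvSD l).1, (pvDelta d).2 + (pvSD l).2)

lemma pvSD_concat (xs : List Char) (d : Char) :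
    pvSD (xs ++ [d]) = ((pvSD xs).1 + (pvDelta d).1, (pvSD xs).2 + (pvDelta d).2) := by
  induction xs with
  | nil => simp [pvSD]
  | cons e xs ih => simp only [List.cons_append, pvSD, ih, Prod.mk.injEq]; constructor <;> ring

lemma pvSD_reverse (xs : List Char) : pvSD xs.reverse = pvSD xs := by
  induction xs with
  | nil => rfl
  | cons d xs ih =>
    simp only [List.reverse_cons, pvSD_concat, ih, pvSD, Prod.mk.injEq]
    constructor <;> ring

lemma pvWalk_concat (xs : List Char) (d : Char) (p : Int × Int) :
    pvWalk (xs ++ [d]) p =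
      pvWalk xs p ++ [(p.1 + (pvSD xs).1 + (pvDelta d).1, p.2 + (pvSD xs).2 + (pvDelta d).2)] := by
  induction xs generalizing p with
  | nil => simp [pvWalk, pvSD]
  | cons e xs ih =>
    simp only [List.cons_append, pvWalk, ih, pvSD, List.cons.injEq,
      List.append_right_inj, Prod.mk.injEq, true_and]
    exact ⟨⟨by ring, by ring⟩, trivial⟩

-- A's fold is the forward walk
lemma pvA_walk (l : List Char) : ∀ (x y : Int) (acc : List (Int × Int)),
    (l.foldl pvStepA (x, y, acc ++ [(x, y)])).2.2 = acc ++ pvWalk l (x, y) := by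
  induction l with
  | nil => intro x y acc; simp [pvWalk]
  | cons d l ih =>
    intro x y acc
    have hstep : pvStepA (x, y, acc ++ [(x, y)]) d =
        (x + (pvDelta d).1, y + (pvDelta d).2,
          (acc ++ [(x, y)]) ++ [(x + (pvDelta d).1, y + (pvDelta d).2)]) := by
      simp only [pvStepA, pvDelta]
      split_ifs <;> simp_all <;> try ring
    simp only [List.foldl_cons, hstep]
    rw [ih]
    simp [pvWalk, List.append_assoc]

-- B's fold builds scanl-style suffix sums starting from the last accumulator element
lemma pvB_fold (r : List Char) : ∀ (c : Int × Int) (acc : List (Int × Int)),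
    r.foldl pvStepB (acc ++ [c]) =
      acc ++ (List.scanl (fun p d => (p.1 + (pvDelta d).1, p.2 + (pvDelta d).2)) c r) := by
  induction r with
  | nil => intro c acc; simp [List.scanl]
  | cons d r ih =>
    intro c acc
    have hstep : pvStepB (acc ++ [c]) d =
        (acc ++ [c]) ++ [(c.1 + (pvDelta d).1, c.2 + (pvDelta d).2)] := by
      simp [pvStepB]
    simp only [List.foldl_cons, hstep, List.scanl_cons]
    rw [ih]
    simp

lemma pv_scanl_last (r : List Char) : ∀ (c d0 : Int × Int),
    (List.scanl (fun p d => (p.1 + (pvDelta d).1, p.2 + (pvDelta d).2)) c r).getLastD d0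
      = (c.1 + (pvSD r).1, c.2 + (pvSD r).2) := by
  induction r with
  | nil => intro c d0; simp [List.scanl, pvSD]
  | cons d r ih =>
    intro c d0
    simp only [List.scanl_cons, List.getLastD_cons, ih, pvSD, Prod.mk.injEq]
    constructor <;> ring

-- key: reversing the subT-image of the suffix-sum scan is the forward walk
lemma pv_key (t : Int × Int) (r : List Char) : ∀ (c : Int × Int),
    ((List.scanl (fun p d => (p.1 + (pvDelta d).1, p.2 + (pvDelta d).2)) c r).map
        (fun p => (t.1 - p.1, t.2 - p.2))).reverse
      = pvWalk r.reverse (t.1 - c.1 - (pvSD r).1, t.2 - c.2 - (pvSD r).2) := by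
  induction r with
  | nil => intro c; simp [List.scanl, pvWalk, pvSD]
  | cons d r ih =>
    intro c
    simp only [List.scanl_cons, List.map_cons, List.reverse_cons, ih, List.reverse_cons,
      pvWalk_concat, pvSD, pvSD_reverse]
    congr 1
    · exact congrArg _ (by simp only [Prod.mk.injEq]; exact ⟨by ring, by ring⟩)
    · simp only [List.cons.injEq, Prod.mk.injEq, and_true]
      exact ⟨by ring, by ring⟩

-- ===== VERDICT =====
theorem deliver_presents_spec : Claim_equal_deliver_presents := by
  intro s _
  unfold Spec_deliver_presents deliver_presents deliver_presents_alt
  have hA := pvA_walk s.toList 0 0 []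
  simp only [List.nil_append] at hA
  rw [hA]
  have hB := pvB_fold s.toList.reverse (0, 0) []
  simp only [List.nil_append] at hB
  rw [hB]
  dsimp only
  rw [pv_scanl_last, List.map_reverse, pv_key]
  simp [pvSD_reverse]
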